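-- pv_equiv track=rewrite | github.com/lovedaybrooke/gender-decoder | app/models.py | handle_duplicates
-- ===== SOURCE A (Python) =====
-- def handle_duplicates(word_list):
--     d = {}
--     l = []
--     for item in word_list:
--         if item not in d.keys():
--             d[item] = 1
--         else:
--             d[item] += 1
--     for key, value in d.items():
--         if value == 1:
--             l.append(key)
--         else:
--             l.append("{0} ({1} times)".format(key, value))
--     return l
-- ===== SOURCE B (Python) =====
-- def handle_duplicates(word_list):
--     out = []
--     rest = word_list
--     while rest:
--         head = rest[0]
--         n = rest.count(head)
--         out.append(head if n == 1 else "{0} ({1} times)".format(head, n))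
--         rest = [w for w in rest[1:] if w != head]
--     return out
-- ===== Notes on version B (the rewrite author's own statement) =====
-- stated objective: alternative
-- what changed: Replaces A's dict-of-counts accumulation followed by a formatting pass over d.items() with a partition worklist: repeatedly take the first remaining word, count it in the remaining list, emit it formatted, and shrink the worklist by filtering out all its occurrences - no dictionary or counts table is ever built.
import Mathlib
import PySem

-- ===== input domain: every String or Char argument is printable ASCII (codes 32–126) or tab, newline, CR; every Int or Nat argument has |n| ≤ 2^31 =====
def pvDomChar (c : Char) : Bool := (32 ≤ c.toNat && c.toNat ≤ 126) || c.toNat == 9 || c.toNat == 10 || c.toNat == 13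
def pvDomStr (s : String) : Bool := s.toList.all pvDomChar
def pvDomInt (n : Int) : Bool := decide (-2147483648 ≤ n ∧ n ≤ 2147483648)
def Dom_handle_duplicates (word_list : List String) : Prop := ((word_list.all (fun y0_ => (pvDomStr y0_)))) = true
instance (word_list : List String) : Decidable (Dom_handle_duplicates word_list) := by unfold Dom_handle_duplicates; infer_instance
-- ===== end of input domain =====

-- B replaces A's count-dict + formatting pass with a partition worklist (take head, count it, filter it out, repeat); alternative decomposition, not faster.

-- "{0} ({1} times)".format(k, v) — shared by both ports (both Pythons format identically)
def fmtTimes (k : String) (v : Int) : String :=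
  PySem.Str.join "" [k, " (", PySem.Int.toStr v, " times)"]

-- ===== PORT A =====
def handle_duplicates (word_list : List String) : List String :=
  let d : PySem.Dict String Int :=
    word_list.foldl (fun d item =>
      if item ∈ d.keys then d.modify item 0 (· + 1) else d.insert item 1) PySem.Dict.empty
  d.items.foldl (fun l kv =>
    if kv.2 == 1 then l ++ [kv.1] else l ++ [fmtTimes kv.1 kv.2]) []

-- ===== PORT B =====
-- the while-loop of Source B: state (out, rest); shrinks rest by filtering out the head's occurrences
def hdAltLoop (out : List String) (rest : List String) : List String :=
  match rest with
  | [] => out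
  | h :: t =>
    let n : Int := (PySem.List.count (h :: t) h : Int)
    hdAltLoop (out ++ [if n == 1 then h else fmtTimes h n]) (t.filter (fun w => !(w == h)))
termination_by rest.length
decreasing_by
  have hle := List.length_filter_le (fun (x : {x // x ∈ t}) => !(x.1 == h)) t.attach
  simp at hle ⊢
  omega

def handle_duplicates_alt (word_list : List String) : List String :=
  hdAltLoop [] word_list

-- ===== PRECONDITION & SPEC =====
def Spec_handle_duplicates (word_list : List String) (out : List String) : Prop := out = handle_duplicates_alt word_list
instance (word_list : List String) (out : List String) : Decidable (Spec_handle_duplicates word_list out) := by unfold Spec_handle_duplicates; infer_instance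

-- ===== CLAIM =====
def Claim_equal_handle_duplicates : Prop := ∀ (word_list : List String), Dom_handle_duplicates word_list → Spec_handle_duplicates word_list (handle_duplicates word_list)

-- ===== LEMMAS AND PROOFS =====

-- the common normal form both programs compute
def hdCanon (l : List String) : List String :=
  (PySem.Set.ofList l).map (fun k =>
    if (l.count k : Int) == 1 then k else fmtTimes k (l.count k : Int))

-- A's accumulation step is exactly Counter's step: on a fresh key, modify with default 0 inserts f 0 = 1
lemma stepA_eq_counter_step (d : PySem.Dict String Int) (item : String) :
    (if item ∈ d.keys then d.modify item 0 (· + 1) else d.insert item 1)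
    = d.modify item 0 (· + 1) := by
  by_cases h : item ∈ d.keys
  · simp [h]
  · have hc : d.contains item = false := by
      rw [← Bool.not_eq_true, PySem.Dict.contains_iff_mem_keys]; exact h
    unfold PySem.Dict.modify
    simp [h, PySem.Dict.getD_of_not_contains d 0 hc]

-- hence A's dict is collections.Counter(word_list)
lemma dictA_eq_counter (word_list : List String) :
    word_list.foldl (fun d item =>
      if item ∈ d.keys then d.modify item 0 (· + 1) else d.insert item 1) PySem.Dict.empty
    = PySem.Dict.counter word_list := by
  rw [PySem.Dict.counter_eq_foldl]
  congr 1
  funext d item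
  exact stepA_eq_counter_step d item

lemma A_eq_canon (word_list : List String) :
    handle_duplicates word_list = hdCanon word_list := by
  unfold handle_duplicates hdCanon
  rw [dictA_eq_counter]
  simp only [PySem.Dict.items_counter]
  have hfold :
      (List.map (fun k => (k, (word_list.count k : Int))) (PySem.Set.ofList word_list)).foldl
        (fun l kv => if kv.2 == 1 then l ++ [kv.1] else l ++ [fmtTimes kv.1 kv.2]) []
      = (List.map (fun k => (k, (word_list.count k : Int))) (PySem.Set.ofList word_list)).map
        (fun kv => if kv.2 == 1 then kv.1 else fmtTimes kv.1 kv.2) := by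
    have := PySem.List.foldl_append_singleton_eq_map
      (fun kv : String × Int => if kv.2 == 1 then kv.1 else fmtTimes kv.1 kv.2)
      (List.map (fun k => (k, (word_list.count k : Int))) (PySem.Set.ofList word_list)) []
    simp only [List.nil_append] at this
    rw [← this]
    congr 1
    funext l kv
    by_cases h : kv.2 == 1 <;> simp [h]
  rw [hfold, List.map_map]
  rfl

-- dedup commutes with filter
lemma ofList_filter (p : String → Bool) (l : List String) :
    PySem.Set.ofList (l.filter p) = (PySem.Set.ofList l).filter p := by
  induction l with
  | nil => simp [PySem.Set.ofList_nil]
  | cons y ys ih =>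
    by_cases hy : p y
    · rw [List.filter_cons_of_pos hy, PySem.Set.ofList_cons, PySem.Set.ofList_cons,
        List.filter_cons_of_pos hy]
      simp only [PySem.Set.discard]
      rw [ih, List.filter_filter, List.filter_filter]
      congr 1
      apply List.filter_congr
      intro z _
      exact Bool.and_comm _ _
    · have hy' : p y = false := by simpa using hy
      rw [List.filter_cons_of_neg (by simp [hy']), PySem.Set.ofList_cons,
        List.filter_cons_of_neg (by simp [hy'])]
      simp only [PySem.Set.discard]
      rw [ih, List.filter_filter]
      apply List.filter_congr
      intro z _
      by_cases hz : z = y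
      · subst hz; simp [hy']
      · simp [hz]

lemma count_filter_ne (t : List String) (h k : String) (hk : k ≠ h) :
    (t.filter (fun w => !(w == h))).count k = t.count k := by
  rw [List.count_filter]
  simp [hk]

-- the loop invariant: hdAltLoop appends the canonical output for the current worklist
lemma altLoop_eq (out rest : List String) :
    hdAltLoop out rest = out ++ hdCanon rest := by
  induction out, rest using hdAltLoop.induct with
  | case1 out => simp [hdAltLoop, hdCanon, PySem.Set.ofList_nil]
  | case2 out h t n ih =>
    simp only [List.unattach_filter, List.unattach_attach, dite_eq_ite] at ih
    rw [hdAltLoop]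
    refine ih.trans ?_
    rw [List.append_assoc]
    congr 1
    have hn : n = (((h : String) :: t).count h : Int) := by
      show (↑(PySem.List.count (h :: t) h) : ℤ) = _
      simp [PySem.List.count_eq]
    rw [hn]
    unfold hdCanon
    rw [PySem.Set.ofList_cons]
    simp only [List.map_cons]
    have hsets : PySem.Set.ofList (t.filter (fun w => !(w == h)))
        = PySem.Set.discard (PySem.Set.ofList t) h := by
      rw [ofList_filter]; rfl
    rw [hsets, List.singleton_append]
    congr 1
    apply List.map_congr_left
    intro k hkmem
    have hk : k ≠ h :=
      ((PySem.Set.mem_discard (s := PySem.Set.ofList t) (x := h) (y := k)).mp hkmem).2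
    rw [count_filter_ne t h k hk]
    have hcc : (h :: t).count k = t.count k := by
      rw [List.count_cons]
      simp [Ne.symm hk]
    rw [hcc]

lemma B_eq_canon (word_list : List String) :
    handle_duplicates_alt word_list = hdCanon word_list := by
  unfold handle_duplicates_alt
  rw [altLoop_eq]
  simp

-- ===== VERDICT =====
theorem handle_duplicates_spec : Claim_equal_handle_duplicates := by
  intro word_list _
  unfold Spec_handle_duplicates
  rw [A_eq_canon, B_eq_canon]
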